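-- pv_equiv track=rewrite | github.com/HoangNV120/RAGChatbot | app/syllabus_converter.py | _extract_sessions
-- ===== SOURCE A (Python) =====
-- def _extract_sessions(sessions, subject_code):
--     """Extract course sessions with each session as one natural sentence containing the course code"""
--     if not sessions:
--         return []
--
--     sentences = []
--
--     for session in sessions:
--         session_num = session.get("Session", "")
--         topic = session.get("Topic", "")
--         if session_num and topic:
--             sentence = f"The course {subject_code} in session {session_num} covers {topic}"
--
--             # Add learning-teaching type
--             teaching_type = session.get("Learning-Teaching Type", "")
--             if teaching_type:
--                 sentence += f" delivered through {teaching_type} methods"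
--
--             # Add learning outcomes
--             lo = session.get("LO", "")
--             if lo:
--                 sentence += f" to achieve learning outcomes {lo}"
--
--             # Add ITU
--             itu = session.get("ITU", "")
--             if itu:
--                 sentence += f" using instructional types {itu}"
--
--             # Add student tasks
--             student_tasks = session.get("Student's Tasks", "")
--             if student_tasks:
--                 sentence += f" where students are required to {student_tasks}"
--
--             # Add student materials
--             student_materials = session.get("Student Materials", "")
--             if student_materials:
--                 sentence += f" utilizing materials such as {student_materials}"
--
--             # Add URLs
--             urls = session.get("URLs", "")
--             if urls:
--                 sentence += f" with resources available at {urls}"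
--
--             sentence += "."
--             sentences.append(sentence)
--
--     return sentences
-- ===== SOURCE B (Python) =====
-- _SPECS = [
--     ("Learning-Teaching Type", " delivered through ", " methods"),
--     ("LO", " to achieve learning outcomes ", ""),
--     ("ITU", " using instructional types ", ""),
--     ("Student's Tasks", " where students are required to ", ""),
--     ("Student Materials", " utilizing materials such as ", ""),
--     ("URLs", " with resources available at ", ""),
-- ]
--
--
-- def _sentence_for(session, subject_code):
--     """Return the sentence for one session, or None if it has no Session/Topic.
--
--     The sentence is assembled back-to-front: start from the final '.' and
--     prepend each present optional fragment, walking the spec table in reverse.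
--     """
--     num = session.get("Session", "")
--     topic = session.get("Topic", "")
--     if not (num and topic):
--         return None
--     end = "."
--     for key, pre, suf in reversed(_SPECS):
--         v = session.get(key, "")
--         if v:
--             end = pre + v + suf + end
--     return f"The course {subject_code} in session {num} covers {topic}" + end
--
--
-- def _extract_sessions(sessions, subject_code):
--     if not sessions:
--         return []
--     head = _sentence_for(sessions[0], subject_code)
--     rest = _extract_sessions(sessions[1:], subject_code)
--     return rest if head is None else [head] + rest
-- ===== Notes on version B (the rewrite author's own statement) =====
-- stated objective: alternative
-- what changed: B is recursive over the session list instead of an accumulator loop, and builds each sentence back-to-front: starting from the terminal '.' it prepends present optional fragments while walking a (key, prefix, suffix) spec table in reverse, instead of A's seven sequential conditional '+=' appends.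
import Mathlib
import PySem

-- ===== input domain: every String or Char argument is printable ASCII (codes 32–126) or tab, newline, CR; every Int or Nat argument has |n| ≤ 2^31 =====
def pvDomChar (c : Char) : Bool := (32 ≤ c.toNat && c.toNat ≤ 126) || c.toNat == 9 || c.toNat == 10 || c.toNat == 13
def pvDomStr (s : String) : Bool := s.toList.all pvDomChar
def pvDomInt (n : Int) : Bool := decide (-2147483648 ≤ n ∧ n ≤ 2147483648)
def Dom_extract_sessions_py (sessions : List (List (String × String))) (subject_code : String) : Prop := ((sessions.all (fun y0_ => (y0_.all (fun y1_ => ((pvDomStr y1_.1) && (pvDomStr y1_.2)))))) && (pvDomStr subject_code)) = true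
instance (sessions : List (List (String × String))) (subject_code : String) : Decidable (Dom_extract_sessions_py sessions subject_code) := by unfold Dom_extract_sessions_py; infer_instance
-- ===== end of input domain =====

-- B is recursive over the session list and builds each sentence back-to-front,
-- prepending fragments while walking a spec table in reverse (objective: alternative).

-- session.get(key, "") on the association list (first match, Python dict lookup); shared dict primitive
def pvGetS (session : List (String × String)) (k : String) : String :=
  ((session.find? (fun p => p.1 == k)).map (·.2)).getD ""

-- ===== PORT A =====
-- the body of A's for-loop: the seven conditional `+=` appends, step for step
def pvStepA (subject_code : String) (sentences : List String) (session : List (String × String)) : List String :=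
  let session_num := pvGetS session "Session"
  let topic := pvGetS session "Topic"
  if session_num ≠ "" ∧ topic ≠ "" then
    let sentence := "The course " ++ subject_code ++ " in session " ++ session_num ++ " covers " ++ topic
    let teaching_type := pvGetS session "Learning-Teaching Type"
    let sentence := if teaching_type ≠ "" then sentence ++ (" delivered through " ++ teaching_type ++ " methods") else sentence
    let lo := pvGetS session "LO"
    let sentence := if lo ≠ "" then sentence ++ (" to achieve learning outcomes " ++ lo) else sentence
    let itu := pvGetS session "ITU"
    let sentence := if itu ≠ "" then sentence ++ (" using instructional types " ++ itu) else sentence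
    let student_tasks := pvGetS session "Student's Tasks"
    let sentence := if student_tasks ≠ "" then sentence ++ (" where students are required to " ++ student_tasks) else sentence
    let student_materials := pvGetS session "Student Materials"
    let sentence := if student_materials ≠ "" then sentence ++ (" utilizing materials such as " ++ student_materials) else sentence
    let urls := pvGetS session "URLs"
    let sentence := if urls ≠ "" then sentence ++ (" with resources available at " ++ urls) else sentence
    let sentence := sentence ++ "."
    sentences ++ [sentence]
  else sentences

def extract_sessions_py (sessions : List (List (String × String))) (subject_code : String) : List String :=
  if sessions.isEmpty then []
  else sessions.foldl (pvStepA subject_code) []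

-- ===== PORT B =====
-- B's spec table: ordered (field key, fragment prefix, fragment suffix)
def pvSpecs : List (String × String × String) :=
  [("Learning-Teaching Type", " delivered through ", " methods"),
   ("LO", " to achieve learning outcomes ", ""),
   ("ITU", " using instructional types ", ""),
   ("Student's Tasks", " where students are required to ", ""),
   ("Student Materials", " utilizing materials such as ", ""),
   ("URLs", " with resources available at ", "")]

-- one step of B's reversed walk: prepend a present fragment to the accumulated ending
def pvEndStep (session : List (String × String)) (acc : String) (f : String × String × String) : String :=
  let v := pvGetS session f.1
  if v ≠ "" then f.2.1 ++ v ++ f.2.2 ++ acc else acc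

-- Source B's _sentence_for: None without Session/Topic; else base ++ (ending built back-to-front)
def pvSentenceFor (session : List (String × String)) (subject_code : String) : Option String :=
  let num := pvGetS session "Session"
  let topic := pvGetS session "Topic"
  if ¬ (num ≠ "" ∧ topic ≠ "") then none
  else
    let e := pvSpecs.reverse.foldl (pvEndStep session) "."
    some ("The course " ++ subject_code ++ " in session " ++ num ++ " covers " ++ topic ++ e)

def extract_sessions_py_alt (sessions : List (List (String × String))) (subject_code : String) : List String :=
  match sessions with
  | [] => []
  | s :: rest =>
    let tail := extract_sessions_py_alt rest subject_code
    match pvSentenceFor s subject_code with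
    | none => tail
    | some h => h :: tail

-- ===== PRECONDITION & SPEC =====
def Spec_extract_sessions_py (sessions : List (List (String × String))) (subject_code : String) (out : List String) : Prop := out = extract_sessions_py_alt sessions subject_code
instance (sessions : List (List (String × String))) (subject_code : String) (out : List String) : Decidable (Spec_extract_sessions_py sessions subject_code out) := by unfold Spec_extract_sessions_py; infer_instance

-- ===== CLAIM (what is proved, stated in full; the proofs are below) =====
def Claim_equal_extract_sessions_py : Prop := ∀ (sessions : List (List (String × String))) (subject_code : String), Dom_extract_sessions_py sessions subject_code → Spec_extract_sessions_py sessions subject_code (extract_sessions_py sessions subject_code)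

-- ===== LEMMAS AND PROOFS =====
-- the string-accumulator view of one of A's conditional `+=` appends
def pvStrStep (session : List (String × String)) (sent : String) (f : String × String × String) : String :=
  let v := pvGetS session f.1
  if v ≠ "" then sent ++ (f.2.1 ++ v ++ f.2.2) else sent

-- forward `+=` folding then '.' equals the base followed by B's back-to-front ending
theorem pvEnds_eq (session : List (String × String)) :
    ∀ (fs : List (String × String × String)) (s : String),
      fs.foldl (pvStrStep session) s ++ "." = s ++ fs.reverse.foldl (pvEndStep session) "." := by
  intro fs
  induction fs with
  | nil => intro s; simp
  | cons f fs ih =>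
    intro s
    simp only [List.foldl_cons, List.reverse_cons, List.foldl_append, List.foldl_nil]
    rw [ih]
    unfold pvStrStep pvEndStep
    by_cases h : pvGetS session f.1 ≠ ""
    · simp [if_pos h, String.append_assoc]
    · simp [if_neg h]

-- A's loop body appends exactly B's optional sentence
theorem pvStep_eq (subject_code : String) (acc : List String) (session : List (String × String)) :
    pvStepA subject_code acc session =
      acc ++ (match pvSentenceFor session subject_code with
              | none => [] | some h => [h]) := by
  unfold pvStepA pvSentenceFor
  by_cases h : pvGetS session "Session" ≠ "" ∧ pvGetS session "Topic" ≠ ""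
  · have key := pvEnds_eq session pvSpecs
      ("The course " ++ subject_code ++ " in session " ++ pvGetS session "Session"
        ++ " covers " ++ pvGetS session "Topic")
    simp only [pvSpecs, List.foldl_cons, List.foldl_nil, pvStrStep, String.append_empty] at key
    simp only [if_pos h, if_neg (not_not_intro h), pvSpecs, key]
  · simp only [if_neg h, if_pos h, List.append_nil]

-- A's foldl with any accumulator is that accumulator followed by B's recursion
theorem pvFold_eq (subject_code : String) :
    ∀ (l : List (List (String × String))) (acc : List String),
      l.foldl (pvStepA subject_code) acc = acc ++ extract_sessions_py_alt l subject_code := by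
  intro l
  induction l with
  | nil => intro acc; simp [extract_sessions_py_alt]
  | cons s rest ih =>
    intro acc
    rw [List.foldl_cons, pvStep_eq, ih]
    cases hs : pvSentenceFor s subject_code <;> simp [extract_sessions_py_alt, hs]

-- ===== VERDICT (by name: the statement is the Claim_ definition above) =====
theorem extract_sessions_py_spec : Claim_equal_extract_sessions_py := by
  intro sessions subject_code _
  unfold Spec_extract_sessions_py extract_sessions_py
  cases sessions with
  | nil => simp [extract_sessions_py_alt]
  | cons s rest =>
    simp only [List.isEmpty_cons, if_neg (Bool.false_ne_true)]
    simpa using pvFold_eq subject_code (s :: rest) []
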